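-- pv_equiv track=rewrite | github.com/tednaleid/quoth | tools/punct-explore.py | segment_by_gaps
-- ===== SOURCE A (Python) =====
-- SEGMENT_GAP_MS = 2000  # same as the extension's gap threshold
--
-- def segment_by_gaps(timed_words: list[dict], gap_ms: int = SEGMENT_GAP_MS, max_words: int = 200) -> list[list[dict]]:
--     """Group timed words into segments separated by gaps >= gap_ms.
--
--     Segments larger than max_words are split into smaller chunks to stay
--     within typical model context windows (~512 tokens). Paragraph breaks
--     from gaps are preserved; sub-chunks within a paragraph are seamless.
--     Returns a list of (segment, is_paragraph_start) tuples.
--     """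
--     if not timed_words:
--         return []
--
--     # First pass: group by timestamp gaps
--     paragraphs: list[list[dict]] = []
--     current: list[dict] = [timed_words[0]]
--     for w in timed_words[1:]:
--         if w["start_ms"] - current[-1]["end_ms"] > gap_ms:
--             paragraphs.append(current)
--             current = []
--         current.append(w)
--     if current:
--         paragraphs.append(current)
--
--     # Second pass: split large paragraphs into model-sized chunks
--     # Track which chunks start a new paragraph
--     segments: list[list[dict]] = []
--     paragraph_starts: list[bool] = []
--
--     for para in paragraphs:
--         if len(para) <= max_words:
--             segments.append(para)
--             paragraph_starts.append(True)
--         else: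
--             for i in range(0, len(para), max_words):
--                 segments.append(para[i : i + max_words])
--                 paragraph_starts.append(i == 0)
--
--     return segments, paragraph_starts
-- ===== SOURCE B (Python) =====
-- SEGMENT_GAP_MS = 2000  # same as the extension's gap threshold
--
--
-- def segment_by_gaps(timed_words: list[dict], gap_ms: int = SEGMENT_GAP_MS, max_words: int = 200) -> list[list[dict]]:
--     """Single pass: build each chunk directly, flushing on a gap or when the
--     chunk reaches max_words; a chunk is a paragraph start unless it continues
--     a size-split paragraph."""
--     if not timed_words:
--         return []
--
--     segments: list[list[dict]] = []
--     paragraph_starts: list[bool] = []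
--     current = [timed_words[0]]
--     is_para_start = True
--     count = 1
--     for w in timed_words[1:]:
--         if w["start_ms"] - current[-1]["end_ms"] > gap_ms:
--             segments.append(current)
--             paragraph_starts.append(is_para_start)
--             current = []
--             count = 0
--             is_para_start = True
--         elif count == max_words:
--             segments.append(current)
--             paragraph_starts.append(is_para_start)
--             current = []
--             count = 0
--             is_para_start = False
--         current.append(w)
--         count += 1
--     segments.append(current)
--     paragraph_starts.append(is_para_start)
--     return segments, paragraph_starts
-- ===== Notes on version B (the rewrite author's own statement) =====
-- stated objective: alternative
-- what changed: Replaces A's two sequential passes (gap-grouping into paragraphs, then range/slice splitting of large paragraphs) with one loop over timed_words that builds each chunk directly, flushing on a gap or when the chunk reaches max_words and tracking the paragraph-start flag inline; Pre_ restricts to the natural domain max_words >= 1 (A raises ValueError at 0 and silently returns ([], []) for negative caps) and excludes empty input (A returns a bare [], not a pair) and missing start_ms/end_ms keys (KeyError).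
-- outside the precondition, e.g. on segment_by_gaps([], 2000, 200): A returns (), B returns (); on segment_by_gaps([{}], 5, -9): A returns ([], []), B returns ([[{}]], [True])
import Mathlib
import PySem

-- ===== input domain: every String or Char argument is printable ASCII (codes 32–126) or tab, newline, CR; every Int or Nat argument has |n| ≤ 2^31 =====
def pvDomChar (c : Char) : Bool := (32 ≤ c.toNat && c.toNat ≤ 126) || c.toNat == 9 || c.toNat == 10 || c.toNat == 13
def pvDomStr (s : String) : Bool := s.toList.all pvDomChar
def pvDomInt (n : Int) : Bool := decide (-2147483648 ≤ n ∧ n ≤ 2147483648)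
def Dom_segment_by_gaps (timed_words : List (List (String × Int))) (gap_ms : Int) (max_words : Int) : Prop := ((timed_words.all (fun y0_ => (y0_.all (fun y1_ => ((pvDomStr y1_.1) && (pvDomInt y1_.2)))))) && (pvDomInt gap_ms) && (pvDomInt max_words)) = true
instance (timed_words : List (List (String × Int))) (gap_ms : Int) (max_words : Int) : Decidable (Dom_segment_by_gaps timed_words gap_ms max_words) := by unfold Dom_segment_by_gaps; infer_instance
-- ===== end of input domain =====

-- B replaces A's two sequential passes (gap-grouping, then range/slice splitting) with one
-- loop that builds each chunk directly; equivalence is proved on Pre_ (max_words ≥ 1).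

-- w["start_ms"] / w["end_ms"]: Python raises KeyError when the key is missing; Pre_ excludes
-- exactly those inputs, so the .getD 0 default is never taken on admitted inputs.
def pvDget (d : List (String × Int)) (k : String) : Int :=
  (PySem.Dict.get? (PySem.Dict.mk d) k).getD 0

-- current[-1]: current is nonempty at every evaluation site in both programs, so the
-- .getD [] default of pyGet? (-1) is never taken.
def pvLastW (l : List (List (String × Int))) : List (String × Int) :=
  (PySem.List.pyGet? l (-1)).getD []

-- ===== PORT A =====
def segment_by_gaps (timed_words : List (List (String × Int))) (gap_ms : Int) (max_words : Int) : (List (List (List (String × Int)))) × List Bool :=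
  match timed_words with
  | [] => ([], [])  -- 'return []' (excluded by Pre_: not a pair in Python)
  | w0 :: rest =>
    -- first pass: group by timestamp gaps
    let p := rest.foldl
      (fun (st : List (List (List (String × Int))) × List (List (String × Int))) w =>
        if pvDget w "start_ms" - pvDget (pvLastW st.2) "end_ms" > gap_ms then
          (st.1 ++ [st.2], [w])
        else (st.1, st.2 ++ [w]))
      ([], [w0])
    let paragraphs := if p.2.isEmpty then p.1 else p.1 ++ [p.2]  -- 'if current:'
    -- second pass: split large paragraphs into chunks
    paragraphs.foldl
      (fun (st : (List (List (List (String × Int)))) × List Bool) para =>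
        if (para.length : Int) ≤ max_words then (st.1 ++ [para], st.2 ++ [true])
        else (PySem.List.pyRange 0 (para.length : Int) max_words).foldl
          (fun st2 i =>
            (st2.1 ++ [PySem.List.slice para (some i) (some (i + max_words))],
             st2.2 ++ [decide (i = 0)]))
          st)
      ([], [])

-- ===== PORT B =====
def segment_by_gaps_alt (timed_words : List (List (String × Int))) (gap_ms : Int) (max_words : Int) : (List (List (List (String × Int)))) × List Bool :=
  match timed_words with
  | [] => ([], [])  -- 'return []' (excluded by Pre_)
  | w0 :: rest =>
    let r := rest.foldl
      (fun (st : (List (List (List (String × Int)))) × List Bool × List (List (String × Int)) × Bool × Int) w =>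
        let (segs, sts, cur, isps, cnt) := st
        let (segs, sts, cur, isps, cnt) :=
          if pvDget w "start_ms" - pvDget (pvLastW cur) "end_ms" > gap_ms then
            (segs ++ [cur], sts ++ [isps], ([] : List (List (String × Int))), true, (0 : Int))
          else if cnt = max_words then
            (segs ++ [cur], sts ++ [isps], ([] : List (List (String × Int))), false, (0 : Int))
          else (segs, sts, cur, isps, cnt)
        (segs, sts, cur ++ [w], isps, cnt + 1))
      ([], [], [w0], true, 1)
    (r.1 ++ [r.2.2.1], r.2.1 ++ [r.2.2.2.1])

-- ===== PRECONDITION & SPEC =====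
-- each adjacent pair of words must carry the keys A's gap test reads (KeyError otherwise)
def pvKeysOk : List (List (String × Int)) → Bool
  | u :: v :: rest =>
    ((PySem.Dict.get? (PySem.Dict.mk v) "start_ms").isSome
      && (PySem.Dict.get? (PySem.Dict.mk u) "end_ms").isSome)
      && pvKeysOk (v :: rest)
  | _ => true

-- Pre_ restricts to the function's natural domain: a word-count cap below 1 is outside it
-- (A raises ValueError at max_words = 0, and for negative max_words its range-based splitter
-- is empty so it silently returns ([], []), an artefact B does not reproduce); it also
-- excludes the empty list (A returns a bare [], not a pair) and missing start_ms/end_ms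
-- keys on an adjacent pair (A raises KeyError).
def Pre_segment_by_gaps (timed_words : List (List (String × Int))) (gap_ms : Int) (max_words : Int) : Prop :=
  timed_words ≠ [] ∧ 1 ≤ max_words ∧ pvKeysOk timed_words = true
instance (timed_words : List (List (String × Int))) (gap_ms : Int) (max_words : Int) : Decidable (Pre_segment_by_gaps timed_words gap_ms max_words) := by unfold Pre_segment_by_gaps; infer_instance

def pvWitness_segment_by_gaps : (List (List (String × Int))) × Int × Int :=
  ([[("start_ms", 0), ("end_ms", 100)], [("start_ms", 3000), ("end_ms", 3100)]], 2000, 200)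

def Spec_segment_by_gaps (timed_words : List (List (String × Int))) (gap_ms : Int) (max_words : Int) (out : (List (List (List (String × Int)))) × List Bool) : Prop := out = segment_by_gaps_alt timed_words gap_ms max_words
instance (timed_words : List (List (String × Int))) (gap_ms : Int) (max_words : Int) (out : (List (List (List (String × Int)))) × List Bool) : Decidable (Spec_segment_by_gaps timed_words gap_ms max_words out) := by unfold Spec_segment_by_gaps; infer_instance

-- ===== CLAIM (what is proved, stated in full; the proofs are below) =====
def Claim_equal_segment_by_gaps : Prop := ∀ (timed_words : List (List (String × Int))) (gap_ms : Int) (max_words : Int), Dom_segment_by_gaps timed_words gap_ms max_words → Pre_segment_by_gaps timed_words gap_ms max_words → Spec_segment_by_gaps timed_words gap_ms max_words (segment_by_gaps timed_words gap_ms max_words)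

-- ===== LEMMAS AND PROOFS =====

-- A's first pass, as a recursion: paragraphs of `ws`, the open paragraph being `cur`
def pvP1 (g : Int) (cur : List (List (String × Int))) : List (List (String × Int)) → List (List (List (String × Int)))
  | [] => [cur]
  | w :: ws =>
    if pvDget w "start_ms" - pvDget (pvLastW cur) "end_ms" > g then
      cur :: pvP1 g [w] ws
    else pvP1 g (cur ++ [w]) ws

-- splitting a list into chunks of size m+1
def pvChunks (m : Nat) : List (List (String × Int)) → List (List (List (String × Int)))
  | [] => []
  | x :: xs => (x :: xs).take (m + 1) :: pvChunks m ((x :: xs).drop (m + 1))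
  termination_by l => l.length
  decreasing_by simp

def pvFlags (m : Nat) (b : Bool) (p : List (List (String × Int))) : List Bool :=
  b :: List.replicate ((pvChunks m p).length - 1) false

def pvMerge (m : Nat) (flag : Bool) (paras : List (List (List (String × Int)))) : (List (List (List (String × Int)))) × List Bool :=
  (paras.flatMap (pvChunks m),
   match paras with
   | [] => []
   | q :: qs => pvFlags m flag q ++ qs.flatMap (pvFlags m true))

-- B's loop, as a recursion
def pvBspec (g mw : Int) (cur : List (List (String × Int))) (flag : Bool) : List (List (String × Int)) → (List (List (List (String × Int)))) × List Bool
  | [] => ([cur], [flag])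
  | w :: ws =>
    if pvDget w "start_ms" - pvDget (pvLastW cur) "end_ms" > g then
      let S := pvBspec g mw [w] true ws
      (cur :: S.1, flag :: S.2)
    else if (cur.length : Int) = mw then
      let S := pvBspec g mw [w] false ws
      (cur :: S.1, flag :: S.2)
    else pvBspec g mw (cur ++ [w]) flag ws

theorem pvChunks_small (m : Nat) (p : List (List (String × Int))) (hne : p ≠ []) (hle : p.length ≤ m + 1) :
    pvChunks m p = [p] := by
  match p, hne with
  | x :: xs, _ =>
    rw [pvChunks, List.take_of_length_le hle, List.drop_eq_nil_of_le hle, pvChunks]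

theorem pvChunks_full (m : Nat) (c q : List (List (String × Int))) (hc : c.length = m + 1) :
    pvChunks m (c ++ q) = c :: pvChunks m q := by
  match c, hc with
  | x :: xs, hc =>
    rw [List.cons_append, pvChunks, ← List.cons_append, List.take_left' hc, List.drop_left' hc]

theorem pvChunks_ne_nil (m : Nat) (p : List (List (String × Int))) (hne : p ≠ []) :
    pvChunks m p ≠ [] := by
  match p, hne with
  | x :: xs, _ => rw [pvChunks]; simp

theorem pvLastW_append (pre c : List (List (String × Int))) (hc : c ≠ []) :
    pvLastW (pre ++ c) = pvLastW c := by
  unfold pvLastW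
  rw [PySem.List.pyGet?_neg_one, PySem.List.pyGet?_neg_one, List.getLast?_append]
  cases hcl : c.getLast? with
  | none => exact absurd (List.getLast?_eq_none_iff.mp hcl) hc
  | some y => simp

theorem pvP1_ne_nil (g : Int) (c : List (List (String × Int))) (ws : List (List (String × Int))) :
    pvP1 g c ws ≠ [] := by
  induction ws generalizing c with
  | nil => simp [pvP1]
  | cons w ws ih =>
    rw [pvP1]; split
    · simp
    · exact ih _

theorem pvP1_mem_ne_nil (g : Int) (ws : List (List (String × Int))) (c : List (List (String × Int))) (hc : c ≠ []) :
    ∀ q ∈ pvP1 g c ws, q ≠ [] := by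
  induction ws generalizing c with
  | nil => intro q hq; rw [pvP1] at hq; simp at hq; simpa [hq]
  | cons w ws ih =>
    intro q hq
    rw [pvP1] at hq
    split at hq
    · rcases List.mem_cons.mp hq with h | h
      · simpa [h]
      · exact ih [w] (by simp) q h
    · exact ih (c ++ [w]) (by simp [hc]) q hq

theorem pvP1_prefix (g : Int) (ws : List (List (String × Int))) (c pre : List (List (String × Int))) (hc : c ≠ []) :
    ∃ q qs, pvP1 g c ws = q :: qs ∧ pvP1 g (pre ++ c) ws = (pre ++ q) :: qs := by
  induction ws generalizing c pre with
  | nil => exact ⟨c, [], by simp [pvP1]⟩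
  | cons w ws ih =>
    rw [pvP1, pvP1, pvLastW_append pre c hc]
    split
    · exact ⟨c, pvP1 g [w] ws, rfl, rfl⟩
    · obtain ⟨q, qs, h1, h2⟩ := ih (c ++ [w]) pre (by simp [hc])
      exact ⟨q, qs, h1, by rw [List.append_assoc]; exact h2⟩

theorem pvRange_cons (L s : Int) (hs : 0 < s) (hL : 0 < L) :
    PySem.List.pyRange 0 L s = 0 :: (PySem.List.pyRange 0 (L - s) s).map (· + s) := by
  rw [PySem.List.pyRange_of_pos _ _ hs, PySem.List.pyRange_of_pos _ _ hs]
  by_cases h2 : 0 < L - s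
  · have hstep : (L - 0 + s - 1) / s = (L - s - 0 + s - 1) / s + 1 := by
      have h : L - 0 + s - 1 = (L - s - 0 + s - 1) + 1 * s := by ring
      rw [h, Int.add_mul_ediv_right _ _ (ne_of_gt hs)]
    have hnn : 0 ≤ (L - s - 0 + s - 1) / s := Int.ediv_nonneg (by omega) (le_of_lt hs)
    have hn : (if (0:Int) < L then ((L - 0 + s - 1) / s).toNat else 0)
        = (if (0:Int) < L - s then ((L - s - 0 + s - 1) / s).toNat else 0) + 1 := by
      rw [if_pos hL, if_pos h2]; omega
    rw [hn, List.range_succ_eq_map]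
    simp only [List.map_cons, List.map_map, Nat.cast_zero, mul_zero, add_zero]
    congr 1
    apply List.map_congr_left
    intro k _
    simp only [Function.comp_apply]
    push_cast
    ring
  · have hn : (if (0:Int) < L then ((L - 0 + s - 1) / s).toNat else 0) = 1 := by
      rw [if_pos hL]
      have h1 : (L - 0 + s - 1) / s = 1 := by
        have h : L - 0 + s - 1 = (L - 1) + 1 * s := by ring
        rw [h, Int.add_mul_ediv_right _ _ (ne_of_gt hs)]
        have : (L - 1) / s = 0 := Int.ediv_eq_zero_of_lt (by omega) (by omega)
        omega
      omega
    rw [hn, if_neg h2]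
    simp

theorem pvRange_nil (b s : Int) (hs : 0 < s) (hb : b ≤ 0) :
    PySem.List.pyRange 0 b s = [] := by
  rw [PySem.List.pyRange_of_pos _ _ hs, if_neg (by omega)]
  simp

theorem pvSliceShift (m : Nat) (p : List (List (String × Int))) (i : Int) (hi : 0 ≤ i) :
    PySem.List.slice p (some (i + ((m:Int)+1))) (some (i + ((m:Int)+1) + ((m:Int)+1)))
      = PySem.List.slice (p.drop (m+1)) (some i) (some (i + ((m:Int)+1))) := by
  rw [PySem.List.slice_toNat p (by omega) (by omega),
    PySem.List.slice_toNat (p.drop (m+1)) hi (by omega), List.drop_drop]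
  congr 1 <;> first | omega | (congr 1 <;> omega)

theorem pvMapChunk (m : Nat) (p : List (List (String × Int))) (hne : p ≠ []) :
    (PySem.List.pyRange 0 (p.length : Int) ((m:Int)+1)).map
      (fun i => PySem.List.slice p (some i) (some (i + ((m:Int)+1)))) = pvChunks m p := by
  induction p using pvChunks.induct m with
  | case1 => exact absurd rfl hne
  | case2 x xs ih =>
    rw [pvRange_cons _ _ (by omega) (by simp only [List.length_cons]; push_cast; omega),
      List.map_cons, List.map_map]
    have hhead : PySem.List.slice (x :: xs) (some 0) (some (0 + ((m:Int)+1)))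
        = (x :: xs).take (m+1) := by
      rw [PySem.List.slice_toNat (x :: xs) (by omega) (by omega)]
      congr 1
      omega
    by_cases hcase : (x :: xs).length ≤ m + 1
    · rw [pvRange_nil _ _ (by omega) (by simp only [List.length_cons] at hcase ⊢; push_cast; omega)]
      simp only [List.map_nil, hhead]
      rw [List.take_of_length_le hcase, pvChunks_small m _ hne hcase]
    · have hdrop_ne : (x :: xs).drop (m+1) ≠ [] := by
        intro h
        have := List.drop_eq_nil_iff.mp h
        omega
      have hlen : ((x :: xs).length : Int) - ((m:Int)+1) = (((x :: xs).drop (m+1)).length : Int) := by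
        simp only [List.length_drop]
        omega
      rw [hlen]
      have htail : (PySem.List.pyRange 0 ((((x :: xs).drop (m+1)).length : Int)) ((m:Int)+1)).map
          ((fun i => PySem.List.slice (x :: xs) (some i) (some (i + ((m:Int)+1)))) ∘ (· + ((m:Int)+1)))
          = pvChunks m ((x :: xs).drop (m+1)) := by
        rw [← ih hdrop_ne]
        apply List.map_congr_left
        intro i hi
        have hi0 : 0 ≤ i := by
          have := (PySem.List.mem_pyRange_iff_of_pos (by omega : (0:Int) < (m:Int)+1) i).mp hi
          omega
        simp only [Function.comp_apply]
        exact pvSliceShift m (x :: xs) i hi0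
      rw [htail, hhead, pvChunks]

theorem pvMapFlag (m : Nat) (p : List (List (String × Int))) (hne : p ≠ []) :
    (PySem.List.pyRange 0 (p.length : Int) ((m:Int)+1)).map (fun i => decide (i = 0))
      = true :: List.replicate ((pvChunks m p).length - 1) false := by
  have hL : (0:Int) < (p.length : Int) := by
    cases p with
    | nil => exact absurd rfl hne
    | cons a l => simp
  have hlen : (pvChunks m p).length
      = ((PySem.List.pyRange 0 ((p.length : Int) - ((m:Int)+1)) ((m:Int)+1)).map (· + ((m:Int)+1))).length + 1 := by
    rw [← pvMapChunk m p hne, pvRange_cons _ _ (by omega) hL]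
    simp
  rw [pvRange_cons _ _ (by omega) hL, List.map_cons, List.map_map]
  have hrep : ((PySem.List.pyRange 0 ((p.length : Int) - ((m:Int)+1)) ((m:Int)+1)).map
      ((fun i => decide (i = 0)) ∘ (· + ((m:Int)+1))))
      = List.replicate ((PySem.List.pyRange 0 ((p.length : Int) - ((m:Int)+1)) ((m:Int)+1)).map (· + ((m:Int)+1))).length false := by
    rw [List.length_map, ← List.map_const']
    apply List.map_congr_left
    intro i hi
    have hi0 : 0 ≤ i := by
      have := (PySem.List.mem_pyRange_iff_of_pos (by omega : (0:Int) < (m:Int)+1) i).mp hi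
      omega
    simp only [Function.comp_apply]
    simp
    omega
  rw [hrep, hlen]
  simp

theorem pvMerge_true (m : Nat) (paras : List (List (List (String × Int)))) :
    pvMerge m true paras = (paras.flatMap (pvChunks m), paras.flatMap (pvFlags m true)) := by
  cases paras with
  | nil => rfl
  | cons q qs => simp [pvMerge]

theorem pvBspec_merge (g mw : Int) (m : Nat) (hmw : mw = (m : Int) + 1)
    (ws : List (List (String × Int))) (cur : List (List (String × Int))) (flag : Bool)
    (hne : cur ≠ []) (hle : cur.length ≤ m + 1) :
    pvBspec g mw cur flag ws = pvMerge m flag (pvP1 g cur ws) := by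
  induction ws generalizing cur flag with
  | nil =>
    rw [pvBspec, pvP1]
    simp [pvMerge, pvFlags, pvChunks_small m cur hne hle]
  | cons w ws ih =>
    rw [pvBspec, pvP1]
    by_cases hgap : pvDget w "start_ms" - pvDget (pvLastW cur) "end_ms" > g
    · rw [if_pos hgap, if_pos hgap]
      rw [ih [w] true (by simp) (by simp)]
      cases hq : pvP1 g [w] ws with
      | nil => exact absurd hq (pvP1_ne_nil g [w] ws)
      | cons q qs =>
        simp [pvMerge, List.flatMap_cons, pvChunks_small m cur hne hle, pvFlags]
    · rw [if_neg hgap, if_neg hgap]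
      by_cases hfull : (cur.length : Int) = mw
      · rw [if_pos hfull]
        rw [ih [w] false (by simp) (by simp)]
        obtain ⟨q, qs, h1, h2⟩ := pvP1_prefix g ws [w] cur (by simp)
        rw [h1, h2]
        have hq_ne : q ≠ [] := pvP1_mem_ne_nil g ws [w] (by simp) q (h1 ▸ List.mem_cons_self)
        have hclen : cur.length = m + 1 := by rw [hmw] at hfull; omega
        have hnq : 1 ≤ (pvChunks m q).length :=
          List.length_pos_iff.mpr (pvChunks_ne_nil m q hq_ne)
        simp only [pvMerge, List.flatMap_cons, pvChunks_full m cur q hclen, pvFlags]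
        have hrep : List.replicate ((cur :: pvChunks m q).length - 1) false
            = false :: List.replicate ((pvChunks m q).length - 1) false := by
          simp only [List.length_cons, Nat.add_sub_cancel]
          conv_lhs => rw [show (pvChunks m q).length = ((pvChunks m q).length - 1) + 1 from by omega]
          rw [List.replicate_succ]
        rw [hrep]
        simp
      · rw [if_neg hfull]
        have hlt : cur.length ≤ m := by rw [hmw] at hfull; omega
        exact ih (cur ++ [w]) flag (by simp) (by simp; omega)

theorem pvB_fold (g mw : Int) (ws : List (List (String × Int)))
    (segs : List (List (List (String × Int)))) (sts : List Bool)
    (cur : List (List (String × Int))) (flag : Bool) (cnt : Int)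
    (hne : cur ≠ []) (hcnt : cnt = (cur.length : Int)) :
    (let r := ws.foldl
      (fun (st : (List (List (List (String × Int)))) × List Bool × List (List (String × Int)) × Bool × Int) w =>
        let (segs, sts, cur, isps, cnt) := st
        let (segs, sts, cur, isps, cnt) :=
          if pvDget w "start_ms" - pvDget (pvLastW cur) "end_ms" > g then
            (segs ++ [cur], sts ++ [isps], ([] : List (List (String × Int))), true, (0 : Int))
          else if cnt = mw then
            (segs ++ [cur], sts ++ [isps], ([] : List (List (String × Int))), false, (0 : Int))
          else (segs, sts, cur, isps, cnt)
        (segs, sts, cur ++ [w], isps, cnt + 1))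
      (segs, sts, cur, flag, cnt);
     (r.1 ++ [r.2.2.1], r.2.1 ++ [r.2.2.2.1]))
    = (segs ++ (pvBspec g mw cur flag ws).1, sts ++ (pvBspec g mw cur flag ws).2) := by
  induction ws generalizing segs sts cur flag cnt with
  | nil => rw [pvBspec]; simp
  | cons w ws ih =>
    rw [List.foldl_cons, pvBspec]
    by_cases hgap : pvDget w "start_ms" - pvDget (pvLastW cur) "end_ms" > g
    · simp only [if_pos hgap]
      rw [ih (segs ++ [cur]) (sts ++ [flag]) ([] ++ [w]) true (0 + 1) (by simp) (by simp)]
      simp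
    · by_cases hfull : cnt = mw
      · simp only [if_neg hgap, if_pos hfull, if_pos (show (cur.length : Int) = mw by omega)]
        rw [ih (segs ++ [cur]) (sts ++ [flag]) ([] ++ [w]) false (0 + 1) (by simp) (by simp)]
        simp
      · simp only [if_neg hgap, if_neg hfull, if_neg (show ¬((cur.length : Int) = mw) by omega)]
        rw [ih segs sts (cur ++ [w]) flag (cnt + 1) (by simp) (by simp [hcnt])]

theorem pvA_fold1 (g : Int) (ws : List (List (String × Int)))
    (paras : List (List (List (String × Int)))) (cur : List (List (String × Int))) (hne : cur ≠ []) :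
    (let r := ws.foldl
      (fun (st : List (List (List (String × Int))) × List (List (String × Int))) w =>
        if pvDget w "start_ms" - pvDget (pvLastW st.2) "end_ms" > g then
          (st.1 ++ [st.2], [w])
        else (st.1, st.2 ++ [w]))
      (paras, cur);
     r.2 ≠ [] ∧ r.1 ++ [r.2] = paras ++ pvP1 g cur ws) := by
  induction ws generalizing paras cur with
  | nil => exact ⟨hne, by simp [pvP1]⟩
  | cons w ws ih =>
    rw [List.foldl_cons]
    by_cases hgap : pvDget w "start_ms" - pvDget (pvLastW cur) "end_ms" > g
    · simp only [if_pos hgap]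
      obtain ⟨h1, h2⟩ := ih (paras ++ [cur]) [w] (by simp)
      refine ⟨h1, ?_⟩
      rw [h2, pvP1, if_pos hgap]
      simp
    · simp only [if_neg hgap]
      obtain ⟨h1, h2⟩ := ih paras (cur ++ [w]) (by simp)
      refine ⟨h1, ?_⟩
      rw [h2, pvP1, if_neg hgap]

theorem pvA_para (mw : Int) (m : Nat) (hmw : mw = (m : Int) + 1)
    (para : List (List (String × Int))) (hp : para ≠ [])
    (segs : List (List (List (String × Int)))) (sts : List Bool) :
    (if (para.length : Int) ≤ mw then (segs ++ [para], sts ++ [true])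
     else (PySem.List.pyRange 0 (para.length : Int) mw).foldl
       (fun st2 i =>
         (st2.1 ++ [PySem.List.slice para (some i) (some (i + mw))],
          st2.2 ++ [decide (i = 0)]))
       (segs, sts))
    = (segs ++ pvChunks m para, sts ++ pvFlags m true para) := by
  by_cases hsm : (para.length : Int) ≤ mw
  · rw [if_pos hsm, pvChunks_small m para hp (by omega), pvFlags,
      pvChunks_small m para hp (by omega)]
    simp
  · rw [if_neg hsm,
      PySem.List.foldl_prod_mk
        (f := fun acc i => acc ++ [PySem.List.slice para (some i) (some (i + mw))])
        (g := fun acc i => acc ++ [decide (i = 0)]),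
      PySem.List.foldl_append_singleton_eq_map, PySem.List.foldl_append_singleton_eq_map,
      hmw, pvMapChunk m para hp, pvMapFlag m para hp, pvFlags]

theorem pvA_fold2 (mw : Int) (m : Nat) (hmw : mw = (m : Int) + 1)
    (paras : List (List (List (String × Int)))) (hps : ∀ q ∈ paras, q ≠ [])
    (segs : List (List (List (String × Int)))) (sts : List Bool) :
    paras.foldl
      (fun (st : (List (List (List (String × Int)))) × List Bool) para =>
        if (para.length : Int) ≤ mw then (st.1 ++ [para], st.2 ++ [true])
        else (PySem.List.pyRange 0 (para.length : Int) mw).foldl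
          (fun st2 i =>
            (st2.1 ++ [PySem.List.slice para (some i) (some (i + mw))],
             st2.2 ++ [decide (i = 0)]))
          st)
      (segs, sts)
    = (segs ++ paras.flatMap (pvChunks m), sts ++ paras.flatMap (pvFlags m true)) := by
  induction paras generalizing segs sts with
  | nil => simp
  | cons para paras ih =>
    rw [List.foldl_cons]
    have hstep := pvA_para mw m hmw para (hps para List.mem_cons_self) segs sts
    rw [hstep, ih (fun q hq => hps q (List.mem_cons_of_mem _ hq))]
    simp

-- ===== VERDICT (by name: the statement is the Claim_ definition above) =====
theorem segment_by_gaps_spec : Claim_equal_segment_by_gaps := by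
  intro tws g mw _ hpre
  obtain ⟨hne, hmw1, _⟩ := hpre
  cases tws with
  | nil => exact absurd rfl hne
  | cons w0 rest =>
    have hmw : mw = ((mw.toNat - 1 : Nat) : Int) + 1 := by omega
    set m := mw.toNat - 1 with hm
    show segment_by_gaps (w0 :: rest) g mw = segment_by_gaps_alt (w0 :: rest) g mw
    have hB : segment_by_gaps_alt (w0 :: rest) g mw = pvMerge m true (pvP1 g [w0] rest) := by
      simp only [segment_by_gaps_alt]
      rw [pvB_fold g mw rest [] [] [w0] true 1 (by simp) (by simp)]
      rw [pvBspec_merge g mw m hmw rest [w0] true (by simp) (by simp)]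
      simp
    have hA : segment_by_gaps (w0 :: rest) g mw = pvMerge m true (pvP1 g [w0] rest) := by
      simp only [segment_by_gaps]
      obtain ⟨h1, h2⟩ := pvA_fold1 g rest [] [w0] (by simp)
      rw [if_neg (by simpa using h1)]
      rw [h2]
      simp only [List.nil_append]
      rw [pvA_fold2 mw m hmw (pvP1 g [w0] rest) (pvP1_mem_ne_nil g rest [w0] (by simp)) [] []]
      rw [pvMerge_true]
      simp
    rw [hA, hB]
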